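-- pv_equiv track=rewrite | github.com/divitize/divitize-zendesk-bot | bot_zendesk.py | user_wrote_after_last_internal
-- ===== SOURCE A (Python) =====
-- from typing import List, Dict, Any, Optional
--
-- def user_wrote_after_last_internal(comments: List[Dict[str,Any]], requester_id: int) -> bool:
--     last_user_idx = -1
--     last_internal_idx = -1
--     for i, c in enumerate(comments):
--         if c.get("public") and c.get("author_id") == requester_id:
--             last_user_idx = i
--         if not c.get("public"):
--             last_internal_idx = i
--     return last_user_idx > last_internal_idx
-- ===== SOURCE B (Python) =====
-- from typing import List, Dict, Any
--
-- def user_wrote_after_last_internal(comments: List[Dict[str, Any]], requester_id: int) -> bool: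
--     for c in reversed(comments):
--         if not c.get("public"):
--             return False
--         if c.get("author_id") == requester_id:
--             return True
--     return False
-- ===== Notes on version B (the rewrite author's own statement) =====
-- stated objective: idiomatic
-- what changed: Instead of one forward pass tracking two running indices and comparing them at the end, B scans the comments in reverse and returns as soon as it hits the last decisive comment (an internal note -> False, a public comment by the requester -> True), skipping public comments by others.
import Mathlib
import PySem

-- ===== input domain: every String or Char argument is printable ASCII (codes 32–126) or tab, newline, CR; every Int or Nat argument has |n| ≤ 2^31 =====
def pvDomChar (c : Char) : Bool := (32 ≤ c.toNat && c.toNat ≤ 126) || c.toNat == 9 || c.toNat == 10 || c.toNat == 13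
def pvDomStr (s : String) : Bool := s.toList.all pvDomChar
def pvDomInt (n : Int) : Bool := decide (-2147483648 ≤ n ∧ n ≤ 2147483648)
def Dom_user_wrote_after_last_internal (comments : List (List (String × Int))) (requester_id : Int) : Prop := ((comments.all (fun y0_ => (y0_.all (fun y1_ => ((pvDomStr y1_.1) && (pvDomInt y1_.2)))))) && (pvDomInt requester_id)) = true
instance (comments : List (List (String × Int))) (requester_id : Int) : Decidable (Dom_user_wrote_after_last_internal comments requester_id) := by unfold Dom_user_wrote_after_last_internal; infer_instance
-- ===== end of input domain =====

-- B scans the comments in reverse with early exit instead of tracking two running indices in a forward pass (idiomatic rewrite, same cost).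


-- ===== PORT A =====
-- truthiness of c.get("public"): missing key or 0 is falsy
def pvPub (c : List (String × Int)) : Bool := (PySem.Dict.get? (PySem.Dict.mk c) "public").getD 0 != 0

-- the for-loop of A: state (last_user_idx, last_internal_idx), index i
def pvLoopA (requester_id : Int) : List (List (String × Int)) → Int → Int × Int → Int × Int
  | [], _, s => s
  | c :: rest, i, s =>
    let s1 := if pvPub c && (PySem.Dict.get? (PySem.Dict.mk c) "author_id" == some requester_id) then (i, s.2) else s
    let s2 := if !(pvPub c) then (s1.1, i) else s1
    pvLoopA requester_id rest (i + 1) s2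

def user_wrote_after_last_internal (comments : List (List (String × Int))) (requester_id : Int) : Bool :=
  let s := pvLoopA requester_id comments 0 (-1, -1)
  decide (s.1 > s.2)

-- ===== PORT B =====
def pvGoB (requester_id : Int) : List (List (String × Int)) → Bool
  | [] => false
  | c :: rest =>
    if !(pvPub c) then false
    else if PySem.Dict.get? (PySem.Dict.mk c) "author_id" == some requester_id then true
    else pvGoB requester_id rest

def user_wrote_after_last_internal_alt (comments : List (List (String × Int))) (requester_id : Int) : Bool :=
  pvGoB requester_id comments.reverse

-- ===== PRECONDITION & SPEC =====
def Spec_user_wrote_after_last_internal (comments : List (List (String × Int))) (requester_id : Int) (out : Bool) : Prop := out = user_wrote_after_last_internal_alt comments requester_id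
instance (comments : List (List (String × Int))) (requester_id : Int) (out : Bool) : Decidable (Spec_user_wrote_after_last_internal comments requester_id out) := by unfold Spec_user_wrote_after_last_internal; infer_instance

-- ===== CLAIM (what is proved, stated in full; the proofs are below) =====
def Claim_equal_user_wrote_after_last_internal : Prop := ∀ (comments : List (List (String × Int))) (requester_id : Int), Dom_user_wrote_after_last_internal comments requester_id → Spec_user_wrote_after_last_internal comments requester_id (user_wrote_after_last_internal comments requester_id)

-- ===== LEMMAS AND PROOFS =====

theorem pvLoopA_append (r : Int) (xs : List (List (String × Int))) (c : List (String × Int))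
    (i : Int) (s : Int × Int) :
    pvLoopA r (xs ++ [c]) i s =
      (let s0 := pvLoopA r xs i s
       let s1 := if pvPub c && (PySem.Dict.get? (PySem.Dict.mk c) "author_id" == some r) then ((i + xs.length : Int), s0.2) else s0
       if !(pvPub c) then (s1.1, (i + xs.length : Int)) else s1) := by
  induction xs generalizing i s with
  | nil => simp [pvLoopA]
  | cons x xs ih =>
    simp only [List.cons_append, pvLoopA, ih, List.length_cons]
    push_cast
    ring_nf

theorem pvLoopA_lt (r : Int) (xs : List (List (String × Int))) (i : Int) (s : Int × Int)
    (h1 : s.1 < i) (h2 : s.2 < i) :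
    (pvLoopA r xs i s).1 < i + xs.length ∧ (pvLoopA r xs i s).2 < i + xs.length := by
  induction xs generalizing i s with
  | nil => simpa [pvLoopA] using ⟨by omega, by omega⟩
  | cons x xs ih =>
    simp only [pvLoopA, List.length_cons]
    have := ih (i + 1)
      (if !(pvPub x) then ((if pvPub x && (PySem.Dict.get? (PySem.Dict.mk x) "author_id" == some r) then (i, s.2) else s).1, i)
        else (if pvPub x && (PySem.Dict.get? (PySem.Dict.mk x) "author_id" == some r) then (i, s.2) else s))
      (by split_ifs <;> simp_all <;> omega)
      (by split_ifs <;> simp_all <;> omega)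
    omega

theorem pv_main (r : Int) (xs : List (List (String × Int))) :
    user_wrote_after_last_internal xs r = user_wrote_after_last_internal_alt xs r := by
  induction xs using List.reverseRecOn with
  | nil => rfl
  | append_singleton xs c ih =>
    have hlt := pvLoopA_lt r xs 0 (-1, -1) (by norm_num) (by norm_num)
    simp only [user_wrote_after_last_internal, user_wrote_after_last_internal_alt,
      List.reverse_append, List.reverse_singleton, List.singleton_append, pvGoB,
      pvLoopA_append] at ih ⊢
    by_cases hp : pvPub c
    · by_cases ha : (PySem.Dict.get? (PySem.Dict.mk c) "author_id" == some r) = true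
      · simp only [hp, ha, Bool.and_self, if_true, Bool.not_true]
        simp only [zero_add] at hlt ⊢
        simp only [Bool.false_eq_true, if_false, gt_iff_lt, decide_eq_true_eq]
        omega
      · simp [hp, ha, ih]
    · simp only [Bool.not_eq_true] at hp
      simp only [hp, Bool.false_and, Bool.not_false, if_true]
      simp only [zero_add] at hlt ⊢
      simp only [Bool.false_eq_true, if_false, gt_iff_lt]
      simp only [decide_eq_false_iff_not]
      omega

-- ===== VERDICT (by name: the statement is the Claim_ definition above) =====
theorem user_wrote_after_last_internal_spec : Claim_equal_user_wrote_after_last_internal := by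
  intro comments requester_id _
  unfold Spec_user_wrote_after_last_internal
  exact pv_main requester_id comments
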